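-- pv_equiv track=rewrite | github.com/evgeni-g-georgiev/tinyguard | simulation/reporting/timeline_plots.py | _anomaly_bands
-- ===== SOURCE A (Python) =====
-- def _anomaly_bands(labels) -> list[tuple[int, int]]:
--     """Contiguous runs of label==1, returned as (start, end_inclusive)."""
--     runs: list[tuple[int, int]] = []
--     start = None
--     for i, v in enumerate(labels):
--         if v == 1 and start is None:
--             start = i
--         elif v != 1 and start is not None:
--             runs.append((start, i - 1))
--             start = None
--     if start is not None:
--         runs.append((start, len(labels) - 1))
--     return runs
-- ===== SOURCE B (Python) =====
-- def _anomaly_bands(labels) -> list[tuple[int, int]]: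
--     """Contiguous runs of label==1, returned as (start, end_inclusive)."""
--     xs = list(labels)
--     runs: list[tuple[int, int]] = []
--     i = 0
--     n = len(xs)
--     while i < n:
--         is_anom = (xs[i] == 1)
--         j = i + 1
--         while j < n and (xs[j] == 1) == is_anom:
--             j += 1
--         if is_anom:
--             runs.append((i, j - 1))
--         i = j
--     return runs
-- ===== Notes on version B (the rewrite author's own statement) =====
-- stated objective: alternative
-- what changed: Replaces the per-element start-sentinel state machine with a trailing flush by a two-pointer scan over maximal equal-key groups: the inner loop advances to the end of each run so each band is emitted in one step and no end-of-loop flush is needed.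
import Mathlib
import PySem

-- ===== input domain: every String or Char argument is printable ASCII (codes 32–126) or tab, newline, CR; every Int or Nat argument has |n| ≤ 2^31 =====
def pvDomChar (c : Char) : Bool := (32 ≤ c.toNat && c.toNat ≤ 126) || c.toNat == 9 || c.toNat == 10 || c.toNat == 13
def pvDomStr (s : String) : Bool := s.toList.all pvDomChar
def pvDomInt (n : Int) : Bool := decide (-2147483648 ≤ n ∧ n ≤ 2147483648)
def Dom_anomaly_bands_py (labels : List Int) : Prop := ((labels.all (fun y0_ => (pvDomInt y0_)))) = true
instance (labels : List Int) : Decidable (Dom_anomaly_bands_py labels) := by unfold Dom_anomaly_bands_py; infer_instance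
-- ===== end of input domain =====

-- ===== PORT A =====
-- B replaces A's start-sentinel state machine by a two-pointer scan over maximal runs (alternative decomposition, same cost).
-- Loop of A: state (runs, start); for i, v in enumerate(labels).
def aLoop (labels : List Int) (i : Int) (runs : List (Int × Int)) (start : Option Int) :
    List (Int × Int) × Option Int :=
  match labels with
  | [] => (runs, start)
  | v :: rest =>
    if v = 1 ∧ start = none then
      aLoop rest (i + 1) runs (some i)
    else if v ≠ 1 ∧ start ≠ none then
      aLoop rest (i + 1) (runs ++ [(start.getD 0, i - 1)]) none
    else
      aLoop rest (i + 1) runs start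

def anomaly_bands_py (labels : List Int) : List (Int × Int) :=
  let st := aLoop labels 0 [] none
  match st.2 with
  | some s => st.1 ++ [(s, (labels.length : Int) - 1)]
  | none => st.1

-- ===== PORT B =====
-- Source B's outer while loop: each step consumes one maximal group (inner j-scan = takeWhile on the tail).
def altGo (xs : List Int) (i : Int) : List (Int × Int) :=
  match xs with
  | [] => []
  | v :: rest =>
    let isAnom : Bool := decide (v = 1)
    let grp := rest.takeWhile (fun x => decide (x = 1) == isAnom)
    let rest' := rest.dropWhile (fun x => decide (x = 1) == isAnom)
    let j : Int := i + 1 + grp.length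
    if isAnom then (i, j - 1) :: altGo rest' j else altGo rest' j
termination_by xs.length
decreasing_by
  all_goals simpa using Nat.lt_succ_of_le (List.length_dropWhile_le _ rest)

def anomaly_bands_py_alt (labels : List Int) : List (Int × Int) := altGo labels 0

-- ===== PRECONDITION & SPEC =====
def Spec_anomaly_bands_py (labels : List Int) (out : List (Int × Int)) : Prop := out = anomaly_bands_py_alt labels
instance (labels : List Int) (out : List (Int × Int)) : Decidable (Spec_anomaly_bands_py labels out) := by unfold Spec_anomaly_bands_py; infer_instance

-- ===== CLAIM (what is proved, stated in full; the proofs are below) =====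
def Claim_equal_anomaly_bands_py : Prop := ∀ (labels : List Int), Dom_anomaly_bands_py labels → Spec_anomaly_bands_py labels (anomaly_bands_py labels)

-- ===== LEMMAS AND PROOFS =====

-- One-element-at-a-time reference recursion; both ports are reduced to it.
def refGo : List Int → Int → Option Int → List (Int × Int)
  | [], _, none => []
  | [], i, some s => [(s, i - 1)]
  | v :: rest, i, none =>
      if v = 1 then refGo rest (i + 1) (some i) else refGo rest (i + 1) none
  | v :: rest, i, some s =>
      if v = 1 then refGo rest (i + 1) (some s) else (s, i - 1) :: refGo rest (i + 1) none

-- A's loop plus its final flush equals runs ++ refGo.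
theorem aLoop_refGo (labels : List Int) : ∀ (i : Int) (runs : List (Int × Int)) (start : Option Int),
    (match aLoop labels i runs start with
     | (rs, some s) => rs ++ [(s, i + labels.length - 1)]
     | (rs, none) => rs) = runs ++ refGo labels i start := by
  induction labels with
  | nil =>
    intro i runs start
    cases start <;> simp [aLoop, refGo]
  | cons v rest ih =>
    intro i runs start
    by_cases hv : v = 1 <;> cases start <;>
      simp [aLoop, refGo, hv] <;>
      · have := ih (i + 1)
        rw [show i + (↑rest.length + 1) - 1 = (i + 1) + ↑rest.length - 1 by ring] at *
        simp_all [List.append_assoc]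

theorem refGo_skip (grp : List Int) : ∀ (t : List Int) (j : Int),
    (∀ x ∈ grp, x ≠ 1) → refGo (grp ++ t) j none = refGo t (j + grp.length) none := by
  induction grp with
  | nil => intro t j _; simp
  | cons g gs ih =>
    intro t j h
    have hg : g ≠ 1 := h g (by simp)
    simp only [List.cons_append, refGo, if_neg hg]
    rw [ih t (j + 1) (fun x hx => h x (by simp [hx]))]
    congr 1; push_cast [List.length_cons]; ring

theorem refGo_ones (grp : List Int) : ∀ (t : List Int) (j : Int) (s : Int),
    (∀ x ∈ grp, x = 1) → refGo (grp ++ t) j (some s) = refGo t (j + grp.length) (some s) := by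
  induction grp with
  | nil => intro t j s _; simp
  | cons g gs ih =>
    intro t j s h
    have hg : g = 1 := h g (by simp)
    simp only [List.cons_append, refGo, if_pos hg]
    rw [ih t (j + 1) s (fun x hx => h x (by simp [hx]))]
    congr 1; push_cast [List.length_cons]; ring

theorem refGo_close (t : List Int) (j s : Int)
    (h : ∀ w ∈ t.head?, w ≠ 1) : refGo t j (some s) = (s, j - 1) :: refGo t j none := by
  cases t with
  | nil => simp [refGo]
  | cons w tt =>
    have hw : w ≠ 1 := h w (by simp)
    simp [refGo, hw]

theorem head?_dropWhile_false {a : Type} (p : a → Bool) (l : List a) :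
    ∀ w ∈ (l.dropWhile p).head?, p w = false := by
  induction l with
  | nil => simp
  | cons x t ih =>
    by_cases h : p x = true
    · simpa [List.dropWhile_cons_of_pos h] using ih
    · simp only [Bool.not_eq_true] at h
      intro w hw
      rw [List.dropWhile_cons_of_neg (by simp [h])] at hw
      simp only [List.head?_cons, Option.mem_def, Option.some.injEq] at hw
      simp [← hw, h]

theorem altGo_refGo_aux : ∀ (n : Nat) (xs : List Int), xs.length ≤ n → ∀ (i : Int), altGo xs i = refGo xs i none := by
  intro n
  induction n with
  | zero =>
    intro xs hn i
    match xs, hn with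
    | [], _ => simp [altGo, refGo]
  | succ n ih =>
    intro xs hn i
    match xs with
    | [] => simp [altGo, refGo]
    | v :: rest =>
      simp only [List.length_cons, Nat.add_le_add_iff_right] at hn
      by_cases hv : v = 1
      · -- anomalous group: flush the whole run at once
        have hb : decide (v = 1) = true := by simp [hv]
        have hgrp : ∀ x ∈ rest.takeWhile (fun x => decide (x = 1) == true), x = 1 := by
          intro x hx
          simpa using List.mem_takeWhile_imp hx
        have hdrop : ∀ w ∈ (rest.dropWhile (fun x => decide (x = 1) == true)).head?, w ≠ 1 := by
          intro w hw
          have h2 := head?_dropWhile_false (fun x => decide (x = 1) == true) rest w hw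
          simpa using h2
        have hrec := ih (rest.dropWhile (fun x => decide (x = 1) == true)) (by
            have := List.length_dropWhile_le (fun x => decide (x = 1) == true) rest
            omega)
        simp only [altGo, refGo, hb, if_pos hv, if_true]
        conv_rhs => rw [← List.takeWhile_append_dropWhile
          (p := fun x => decide (x = 1) == true) (l := rest)]
        rw [refGo_ones _ _ _ _ hgrp, refGo_close _ _ _ hdrop, hrec]
      · have hb : decide (v = 1) = false := by simp [hv]
        have hgrp : ∀ x ∈ rest.takeWhile (fun x => decide (x = 1) == false), x ≠ 1 := by
          intro x hx
          simpa using List.mem_takeWhile_imp hx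
        have hrec := ih (rest.dropWhile (fun x => decide (x = 1) == false)) (by
            have := List.length_dropWhile_le (fun x => decide (x = 1) == false) rest
            omega)
        simp only [altGo, refGo, hb, if_neg hv, Bool.false_eq_true, if_false]
        conv_rhs => rw [← List.takeWhile_append_dropWhile
          (p := fun x => decide (x = 1) == false) (l := rest)]
        rw [refGo_skip _ _ _ hgrp, hrec]

theorem altGo_refGo (labels : List Int) (i : Int) : altGo labels i = refGo labels i none :=
  altGo_refGo_aux labels.length labels le_rfl i

theorem anomaly_bands_py_spec : Claim_equal_anomaly_bands_py := by
  intro labels _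
  unfold Spec_anomaly_bands_py anomaly_bands_py anomaly_bands_py_alt
  show (match (aLoop labels 0 [] none).2 with
        | some s => (aLoop labels 0 [] none).1 ++ [(s, (labels.length : Int) - 1)]
        | none => (aLoop labels 0 [] none).1) = altGo labels 0
  have h := aLoop_refGo labels 0 [] none
  simp only [List.nil_append, zero_add] at h
  rw [altGo_refGo, ← h]
  rcases hst : aLoop labels 0 [] none with ⟨rs, st⟩
  cases st <;> simp
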